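-- pv_equiv track=rewrite | github.com/tkylim/mahjong-framework | pkg/harbin/Winning.py | Map_Remainings
-- ===== SOURCE A (Python) =====
-- import copy
--
-- def Map_Remainings(patterns_found, tiles): # combos are a collection of existed pairs or sequences,
--     #this fcn removes them from the overall list, and returns the mapping of patterns and their corresponding leftovers
--
--     collections = []
--     for pattern in patterns_found:
--         leftovers = copy.deepcopy(tiles)
--
--         for p in pattern:
--             leftovers.remove(p)
--         collections.append((pattern, leftovers))
--
--     return collections
-- ===== SOURCE B (Python) =====
-- def Map_Remainings(patterns_found, tiles):
--     positions = {}
--     for i, t in enumerate(tiles):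
--         positions.setdefault(t, []).append(i)
--     collections = []
--     for pattern in patterns_found:
--         used = {}
--         removed = set()
--         for p in pattern:
--             k = used.get(p, 0)
--             removed.add(positions[p][k])
--             used[p] = k + 1
--         leftovers = [t for i, t in enumerate(tiles) if i not in removed]
--         collections.append((pattern, leftovers))
--     return collections
-- ===== Notes on version B (the rewrite author's own statement) =====
-- stated objective: faster
-- what changed: Instead of deep-copying tiles and doing one linear list.remove scan per pattern element, B builds a value-to-indices map of tiles once, marks the removed occurrence indices per pattern via dictionary/index lookups, and emits the leftovers in a single filtered pass; Pre_ excludes inputs where some pattern is not a sub-multiset of tiles, on which A raises ValueError (and B raises KeyError/IndexError).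
import Mathlib
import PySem

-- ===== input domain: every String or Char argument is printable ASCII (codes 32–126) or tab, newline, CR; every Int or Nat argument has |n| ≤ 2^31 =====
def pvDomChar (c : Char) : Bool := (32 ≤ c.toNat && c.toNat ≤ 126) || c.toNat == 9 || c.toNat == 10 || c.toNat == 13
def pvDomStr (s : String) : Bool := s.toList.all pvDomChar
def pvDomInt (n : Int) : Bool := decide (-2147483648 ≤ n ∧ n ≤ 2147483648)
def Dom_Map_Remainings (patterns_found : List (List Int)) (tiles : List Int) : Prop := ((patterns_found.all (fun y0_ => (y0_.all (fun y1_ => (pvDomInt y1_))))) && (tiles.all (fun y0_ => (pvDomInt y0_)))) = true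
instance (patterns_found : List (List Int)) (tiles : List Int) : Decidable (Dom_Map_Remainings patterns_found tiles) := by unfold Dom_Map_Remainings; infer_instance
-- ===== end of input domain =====

-- B indexes the positions of each tile value once, marks the removed occurrence indices per
-- pattern, and builds the leftovers in one filtered pass — instead of A's deepcopy and one
-- linear list.remove scan per pattern element (objective: faster).

-- ===== PORT A =====
-- deepcopy of a list of ints is the list itself; list.remove is PySem.List.remove?
-- (none = ValueError, excluded by Pre_; the .getD fallback is only reached outside Pre_).
def pvRemoveAll (tiles pattern : List Int) : List Int :=
  pattern.foldl (fun leftovers p => (PySem.List.remove? leftovers p).getD leftovers) tiles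

def Map_Remainings (patterns_found : List (List Int)) (tiles : List Int) : List (List Int × List Int) :=
  patterns_found.foldl (fun collections pattern =>
    collections ++ [(pattern, pvRemoveAll tiles pattern)]) []

-- ===== PORT B =====
-- positions[t] = the indices of t in tiles, in order (setdefault + append = insert with the appended list)
def pvPositions (tiles : List Int) : PySem.Dict Int (List Int) :=
  (PySem.List.enumerate tiles 0).foldl
    (fun d it => d.insert it.2 (d.getD it.2 [] ++ [it.1])) PySem.Dict.empty

-- the inner pattern loop: state (used, removed); positions[p][k] raises KeyError/IndexError in
-- Python exactly outside Pre_, so the .getD fallbacks are only reached outside Pre_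
def pvMarkRemoved (positions : PySem.Dict Int (List Int)) (pattern : List Int) :
    PySem.Dict Int Int × PySem.Set Int :=
  pattern.foldl (fun st p =>
    let k := st.1.getD p 0
    let idx := (PySem.List.pyGet? (positions.getD p []) k).getD (-1)
    (st.1.insert p (k + 1), PySem.Set.add st.2 idx)) (PySem.Dict.empty, PySem.Set.empty)

def pvLeftovers (positions : PySem.Dict Int (List Int)) (tiles pattern : List Int) : List Int :=
  let removed := (pvMarkRemoved positions pattern).2
  ((PySem.List.enumerate tiles 0).filter (fun it => !(PySem.Set.contains removed it.1))).map (·.2)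

def Map_Remainings_alt (patterns_found : List (List Int)) (tiles : List Int) : List (List Int × List Int) :=
  let positions := pvPositions tiles
  patterns_found.foldl (fun collections pattern =>
    collections ++ [(pattern, pvLeftovers positions tiles pattern)]) []

-- ===== PRECONDITION & SPEC =====
-- Pre_: every pattern is a sub-multiset of tiles — exactly the inputs where A's list.remove
-- never raises ValueError (and where B's positions[p][k] lookups never raise either).
def Pre_Map_Remainings (patterns_found : List (List Int)) (tiles : List Int) : Prop :=
  ∀ pattern ∈ patterns_found, ∀ p ∈ pattern, pattern.count p ≤ tiles.count p
instance (patterns_found : List (List Int)) (tiles : List Int) : Decidable (Pre_Map_Remainings patterns_found tiles) := by unfold Pre_Map_Remainings; infer_instance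

def pvWitness_Map_Remainings : List (List Int) × List Int := ([[1], [2, 2]], [2, 1, 2])

def Spec_Map_Remainings (patterns_found : List (List Int)) (tiles : List Int) (out : List (List Int × List Int)) : Prop := out = Map_Remainings_alt patterns_found tiles
instance (patterns_found : List (List Int)) (tiles : List Int) (out : List (List Int × List Int)) : Decidable (Spec_Map_Remainings patterns_found tiles out) := by unfold Spec_Map_Remainings; infer_instance

-- ===== CLAIM (what is proved, stated in full; the proofs are below) =====
def Claim_equal_Map_Remainings : Prop := ∀ (patterns_found : List (List Int)) (tiles : List Int), Dom_Map_Remainings patterns_found tiles → Pre_Map_Remainings patterns_found tiles → Spec_Map_Remainings patterns_found tiles (Map_Remainings patterns_found tiles)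

-- ===== LEMMAS AND PROOFS =====

-- ---------- the A side: sequential first-occurrence removal as a count-driven pass ----------

-- functional model of removing, for each value v, its first (cnt v) occurrences
def pvPassC (cnt : Int → Int) : List Int → List Int
  | [] => []
  | t :: ts =>
    if cnt t > 0 then pvPassC (fun v => if v = t then cnt v - 1 else cnt v) ts
    else t :: pvPassC cnt ts

lemma pvPassC_cons (cnt : Int → Int) (t : Int) (ts : List Int) :
    pvPassC cnt (t :: ts) =
      if cnt t > 0 then pvPassC (fun v => if v = t then cnt v - 1 else cnt v) ts
      else t :: pvPassC cnt ts := rfl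

lemma pvPassC_nonpos (cnt : Int → Int) (ts : List Int) (h : ∀ v, cnt v ≤ 0) :
    pvPassC cnt ts = ts := by
  induction ts with
  | nil => rfl
  | cons t ts ih => rw [pvPassC_cons, if_neg (by have := h t; omega), ih]

lemma pvPassC_incr (ts : List Int) (cnt : Int → Int) (p : Int) (h0 : 0 ≤ cnt p) (hm : p ∈ ts) :
    pvPassC (fun v => if v = p then cnt v + 1 else cnt v) ts = pvPassC cnt (ts.erase p) := by
  induction ts generalizing cnt with
  | nil => cases hm
  | cons t ts ih =>
    rw [pvPassC_cons]
    by_cases htp : t = p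
    · subst htp
      rw [if_pos (show (if t = t then cnt t + 1 else cnt t) > 0 by rw [if_pos rfl]; omega), List.erase_cons_head]
      congr 1
      funext v
      by_cases hv : v = t <;> simp [hv]
    · have herase : (t :: ts).erase p = t :: ts.erase p :=
        List.erase_cons_tail (by simp [htp])
      have hm' : p ∈ ts := by
        cases hm with
        | head => exact absurd rfl htp
        | tail _ h => exact h
      have hpt : ¬ (p = t) := fun h => htp h.symm
      rw [herase, pvPassC_cons]
      by_cases hc : cnt t > 0
      · rw [if_pos (by simp only [if_neg htp]; exact hc), if_pos hc]
        have hfun : (fun v => if v = t then (if v = p then cnt v + 1 else cnt v) - 1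
              else (if v = p then cnt v + 1 else cnt v))
            = (fun v => if v = p then (if v = t then cnt v - 1 else cnt v) + 1
              else (if v = t then cnt v - 1 else cnt v)) := by
          funext v
          by_cases hv : v = t <;> by_cases hvp : v = p <;> simp [hv, hvp] <;> omega
        rw [show (fun v => if v = t then (fun w => if w = p then cnt w + 1 else cnt w) v - 1
              else (fun w => if w = p then cnt w + 1 else cnt w) v)
            = (fun v => if v = p then (if v = t then cnt v - 1 else cnt v) + 1
              else (if v = t then cnt v - 1 else cnt v)) from hfun]
        exact ih _ (by simp [hpt]; omega) hm'
      · rw [if_neg (by simp only [if_neg htp]; exact hc), if_neg hc]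
        rw [ih _ h0 hm']

lemma pvRemoveAll_eq_passC (ps ts : List Int) (h : ∀ v, ps.count v ≤ ts.count v) :
    pvRemoveAll ts ps = pvPassC (fun v => (ps.count v : Int)) ts := by
  induction ps generalizing ts with
  | nil =>
    rw [pvPassC_nonpos _ ts (by simp)]
    rfl
  | cons p ps ih =>
    have hmem : p ∈ ts := by
      have := h p
      simp [List.count_cons_self] at this
      exact List.count_pos_iff.mp (by omega)
    have hrm : (PySem.List.remove? ts p).getD ts = ts.erase p := by
      rw [PySem.List.remove?_eq_some_erase ts p hmem]; rfl
    have hcount : ∀ v, ps.count v ≤ (ts.erase p).count v := by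
      intro v
      have := h v
      rw [List.count_erase]
      by_cases hv : p = v <;> simp [hv] at this ⊢ <;> omega
    have hfun : (fun v => (((p :: ps).count v : Nat) : Int))
        = (fun v => if v = p then ((ps.count v : Nat) : Int) + 1 else ((ps.count v : Nat) : Int)) := by
      funext v
      by_cases hv : v = p
      · subst hv
        simp [List.count_cons_self]
      · have hpv : ¬ p = v := fun h2 => hv h2.symm
        simp [hv, hpv]
    calc pvRemoveAll ts (p :: ps)
        = pvRemoveAll (ts.erase p) ps := by
          simp only [pvRemoveAll, List.foldl_cons, hrm]
      _ = pvPassC (fun v => (ps.count v : Int)) (ts.erase p) := ih _ hcount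
      _ = pvPassC (fun v => ((p :: ps).count v : Int)) ts := by
          rw [hfun, pvPassC_incr ts _ p (by positivity) hmem]

-- ---------- the B side: positions, the removed set, and the filtered pass ----------

-- proof-side model of positions[v]: the indices of v in ts, in order
def pvPosL (v : Int) : List Int → List Nat
  | [] => []
  | t :: ts => if t = v then 0 :: (pvPosL v ts).map (· + 1) else (pvPosL v ts).map (· + 1)

lemma pvPosL_length (v : Int) (ts : List Int) : (pvPosL v ts).length = ts.count v := by
  induction ts with
  | nil => rfl
  | cons t ts ih =>
    by_cases h : t = v <;> simp [pvPosL, h, List.count_cons, ih]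

lemma pvMemTakeMono {α : Type} (l : List α) {k k' : Nat} (h : k ≤ k') {a : α}
    (ha : a ∈ l.take k) : a ∈ l.take k' := by
  have heq : l.take k = (l.take k').take k := by
    rw [List.take_take, Nat.min_eq_left h]
  rw [heq] at ha
  exact List.mem_of_mem_take ha

lemma pvMemTakeMapSucc (l : List Nat) : ∀ (k m : Nat),
    m + 1 ∈ (l.map (· + 1)).take k ↔ m ∈ l.take k := by
  induction l with
  | nil => intro k m; simp
  | cons a l ih =>
    intro k m
    cases k with
    | zero => simp
    | succ k =>
      simp only [List.map_cons, List.take_succ_cons, List.mem_cons]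
      rw [ih k m]
      constructor
      · rintro (h | h)
        · exact Or.inl (by omega)
        · exact Or.inr h
      · rintro (h | h)
        · exact Or.inl (by omega)
        · exact Or.inr h

-- membership in a take-prefix of positions = "index holds v and its occurrence rank is < k"
lemma pvPosL_take_mem (ts : List Int) (v : Int) :
    ∀ (k n : Nat), n ∈ (pvPosL v ts).take k ↔ ts[n]? = some v ∧ (ts.take n).count v < k := by
  induction ts with
  | nil => intro k n; simp [pvPosL]
  | cons t ts ih =>
    intro k n
    by_cases htv : t = v
    · subst htv
      have hps : pvPosL t (t :: ts) = 0 :: (pvPosL t ts).map (· + 1) := by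
        simp [pvPosL]
      rw [hps]
      cases k with
      | zero => simp
      | succ k =>
        rw [List.take_succ_cons]
        cases n with
        | zero => simp
        | succ m =>
          have h1 : m + 1 ∈ 0 :: ((pvPosL t ts).map (· + 1)).take k ↔
              m + 1 ∈ ((pvPosL t ts).map (· + 1)).take k := by
            simp
          rw [h1, pvMemTakeMapSucc, ih k m]
          simp only [List.getElem?_cons_succ, List.take_succ_cons, List.count_cons_self]
          constructor <;> (rintro ⟨h, h2⟩; exact ⟨h, by omega⟩)
    · have hps : pvPosL v (t :: ts) = (pvPosL v ts).map (· + 1) := by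
        simp [pvPosL, htv]
      rw [hps]
      cases n with
      | zero =>
        simp only [List.getElem?_cons_zero]
        constructor
        · intro hmem
          have h0 := List.mem_of_mem_take hmem
          rcases List.mem_map.mp h0 with ⟨a, -, ha⟩
          omega
        · rintro ⟨hv, -⟩
          exact absurd (Option.some.inj hv) htv
      | succ m =>
        rw [pvMemTakeMapSucc, ih k m]
        have hcount : ((t :: ts).take (m + 1)).count v = (ts.take m).count v := by
          rw [List.take_succ_cons]
          simp [List.count_cons, htv]
        rw [List.getElem?_cons_succ, hcount]

-- the positions dict computes pvPosL (generalized over the running start index and dict)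
lemma pvMapShift (l : List Nat) (s : Int) :
    (l.map (· + 1)).map (fun n : Nat => s + (n : Int)) = l.map (fun n : Nat => (s + 1) + (n : Int)) := by
  rw [List.map_map]
  apply List.map_congr_left
  intro n _
  simp only [Function.comp]
  push_cast
  ring

lemma pvPositions_fold (ts : List Int) :
    ∀ (s : Int) (d : PySem.Dict Int (List Int)) (v : Int),
    ((PySem.List.enumerate ts s).foldl
      (fun d it => d.insert it.2 (d.getD it.2 [] ++ [it.1])) d).getD v []
      = d.getD v [] ++ (pvPosL v ts).map (fun n : Nat => s + (n : Int)) := by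
  induction ts with
  | nil => intro s d v; simp [PySem.List.enumerate_nil, pvPosL]
  | cons t ts ih =>
    intro s d v
    rw [PySem.List.enumerate_cons, List.foldl_cons, ih]
    by_cases hv : v = t
    · subst hv
      have hps : pvPosL v (v :: ts) = 0 :: (pvPosL v ts).map (· + 1) := by
        simp [pvPosL]
      rw [PySem.Dict.getD_insert, if_pos rfl, hps, List.map_cons, pvMapShift]
      simp
    · have htv : ¬ t = v := fun h => hv h.symm
      have hps : pvPosL v (t :: ts) = (pvPosL v ts).map (· + 1) := by
        simp [pvPosL, htv]
      rw [PySem.Dict.getD_insert, if_neg hv, hps, pvMapShift]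

lemma pvPositions_getD (tiles : List Int) (v : Int) :
    (pvPositions tiles).getD v [] = (pvPosL v tiles).map (fun n : Nat => (n : Int)) := by
  rw [pvPositions, pvPositions_fold tiles 0 PySem.Dict.empty v]
  simp [PySem.Dict.getD_empty]

-- invariant of the pattern fold: used counts the processed prefix, removed holds, for each
-- value v, the first (prefix.count v) position indices of v
lemma pvMark_inv (tiles : List Int) :
    ∀ (rest q : List Int)
      (hcnt : ∀ v, (q ++ rest).count v ≤ tiles.count v)
      (used : PySem.Dict Int Int) (rm : PySem.Set Int)
      (hu : ∀ v, used.getD v 0 = (q.count v : Int))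
      (hr : ∀ x, x ∈ rm ↔ ∃ v, x ∈ ((pvPosL v tiles).map (fun n : Nat => (n : Int))).take (q.count v)),
    ∀ x, x ∈ (rest.foldl (fun st p =>
        let k := st.1.getD p 0
        let idx := (PySem.List.pyGet? ((pvPositions tiles).getD p []) k).getD (-1)
        (st.1.insert p (k + 1), PySem.Set.add st.2 idx)) (used, rm)).2 ↔
      ∃ v, x ∈ ((pvPosL v tiles).map (fun n : Nat => (n : Int))).take ((q ++ rest).count v) := by
  intro rest
  induction rest with
  | nil =>
    intro q _ used rm _ hr x
    simpa using hr x
  | cons p rest ih =>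
    intro q hcnt used rm hu hr x
    have hklt : q.count p < tiles.count p := by
      have := hcnt p
      simp [List.count_append, List.count_cons_self] at this
      omega
    have hlen : q.count p < ((pvPosL p tiles).map (fun n : Nat => (n : Int))).length := by
      rw [List.length_map, pvPosL_length]; exact hklt
    have hidx : (PySem.List.pyGet? ((pvPositions tiles).getD p []) (used.getD p 0)).getD (-1)
        = ((pvPosL p tiles).map (fun n : Nat => (n : Int)))[q.count p]'hlen := by
      rw [hu p, pvPositions_getD, PySem.List.pyGet?_natCast, List.getElem?_eq_getElem hlen]
      rfl
    have hcnt1 : ∀ v, (q ++ [p]).count v = q.count v + if v = p then 1 else 0 := by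
      intro v
      rw [List.count_append]
      by_cases hv : v = p
      · subst hv; simp
      · simp [List.count_nil, Ne.symm hv, hv]
    have hu' : ∀ v, (used.insert p (used.getD p 0 + 1)).getD v 0 = ((q ++ [p]).count v : Int) := by
      intro v
      rw [PySem.Dict.getD_insert, hcnt1 v]
      by_cases hv : v = p
      · rw [if_pos hv, if_pos hv, hv, hu]; push_cast; ring
      · rw [if_neg hv, if_neg hv, hu]; ring
    have hr' : ∀ y, y ∈ PySem.Set.add rm
          ((PySem.List.pyGet? ((pvPositions tiles).getD p []) (used.getD p 0)).getD (-1)) ↔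
        ∃ v, y ∈ ((pvPosL v tiles).map (fun n : Nat => (n : Int))).take ((q ++ [p]).count v) := by
      intro y
      rw [PySem.Set.mem_add, hidx]
      constructor
      · rintro (hy | hy)
        · rcases (hr y).mp hy with ⟨v, hv⟩
          refine ⟨v, pvMemTakeMono _ ?_ hv⟩
          rw [hcnt1 v]
          omega
        · refine ⟨p, ?_⟩
          rw [hcnt1 p, if_pos rfl, List.take_succ, List.getElem?_eq_getElem hlen]
          simp [hy]
      · rintro ⟨v, hv⟩
        by_cases hvp : v = p
        · subst hvp
          rw [hcnt1 v, if_pos rfl, List.take_succ, List.getElem?_eq_getElem hlen] at hv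
          rcases List.mem_append.mp hv with hv | hv
          · exact Or.inl ((hr y).mpr ⟨v, hv⟩)
          · right
            simpa using hv
        · rw [hcnt1 v, if_neg hvp] at hv
          simp only [Nat.add_zero] at hv
          exact Or.inl ((hr y).mpr ⟨v, hv⟩)
    rw [List.foldl_cons]
    have hmain := ih (q ++ [p])
      (by intro v; have := hcnt v; simp [List.count_append, List.count_cons] at this ⊢; omega)
      (used.insert p (used.getD p 0 + 1))
      (PySem.Set.add rm
        ((PySem.List.pyGet? ((pvPositions tiles).getD p []) (used.getD p 0)).getD (-1)))
      hu' hr' x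
    rw [List.append_assoc] at hmain
    exact hmain

-- the removed set after the whole pattern, pointwise at a natural index
lemma pvRemoved_mem (tiles pattern : List Int)
    (hcnt : ∀ v, pattern.count v ≤ tiles.count v) (x : Int) :
    x ∈ (pvMarkRemoved (pvPositions tiles) pattern).2 ↔
      ∃ v, x ∈ ((pvPosL v tiles).map (fun n : Nat => (n : Int))).take (pattern.count v) := by
  have := pvMark_inv tiles pattern [] (by simpa using hcnt) PySem.Dict.empty PySem.Set.empty
    (fun v => by simp [PySem.Dict.getD_empty]) (fun y => by simp [PySem.Set.empty])
  simpa [pvMarkRemoved] using this x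

-- ---------- the filtered pass equals the count-driven pass ----------

-- rank-based model of the filter: drop t when its occurrence rank so far is below cnt t
def pvRank (seen : Int → Nat) (cnt : Int → Nat) : List Int → List Int
  | [] => []
  | t :: ts =>
    if seen t < cnt t then pvRank (fun v => if v = t then seen v + 1 else seen v) cnt ts
    else t :: pvRank (fun v => if v = t then seen v + 1 else seen v) cnt ts

lemma pvRank_eq_passC (ts : List Int) :
    ∀ (seen : Int → Nat) (cnt : Int → Nat) (c : Int → Int),
    (∀ v, c v = (cnt v : Int) - seen v ∨ (c v ≤ 0 ∧ cnt v ≤ seen v)) →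
    pvRank seen cnt ts = pvPassC c ts := by
  induction ts with
  | nil => intros; rfl
  | cons t ts ih =>
    intro seen cnt c hrel
    rw [pvRank, pvPassC_cons]
    have htest : (seen t < cnt t) ↔ (c t > 0) := by
      rcases hrel t with h | ⟨h1, h2⟩ <;> omega
    by_cases h : seen t < cnt t
    · rw [if_pos h, if_pos (htest.mp h)]
      apply ih
      intro v
      by_cases hv : v = t
      · subst hv
        rcases hrel v with hc | ⟨h1, h2⟩
        · left; simp [hc]; push_cast; ring
        · omega
      · simpa [hv] using hrel v
    · rw [if_neg h, if_neg (fun hc => h (htest.mpr hc))]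
      congr 1
      apply ih
      intro v
      by_cases hv : v = t
      · subst hv
        right
        rcases hrel v with hc | ⟨h1, h2⟩ <;> simp <;> omega
      · simpa [hv] using hrel v

-- the enumerate-filter pass equals pvRank, generalizing over the already-scanned prefix
lemma pvFilter_main (tiles : List Int) (cnt : Int → Nat) (rm : PySem.Set Int)
    (hrm : ∀ (n : Nat), ((n : Int) ∈ rm ↔ ∃ v, n ∈ (pvPosL v tiles).take (cnt v))) :
    ∀ (ts pre : List Int), tiles = pre ++ ts →
    ((PySem.List.enumerate ts (pre.length : Int)).filter
        (fun it => !(PySem.Set.contains rm it.1))).map (·.2)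
      = pvRank (fun v => pre.count v) cnt ts := by
  intro ts
  induction ts with
  | nil => intro pre _; simp [PySem.List.enumerate_nil, pvRank]
  | cons t ts ih =>
    intro pre htiles
    have hget : tiles[pre.length]? = some t := by
      rw [htiles]
      rw [List.getElem?_append_right (Nat.le_refl _)]
      simp
    have hmem : ((pre.length : Int) ∈ rm) ↔ pre.count t < cnt t := by
      rw [hrm pre.length]
      constructor
      · rintro ⟨v, hv⟩
        have hh := (pvPosL_take_mem tiles v (cnt v) pre.length).mp hv
        have hveq : v = t := by
          have := hh.1
          rw [hget] at this
          exact (Option.some.inj this).symm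
        subst hveq
        have htake : tiles.take pre.length = pre := by rw [htiles, List.take_left]
        rw [htake] at hh
        exact hh.2
      · intro hlt
        refine ⟨t, (pvPosL_take_mem tiles t (cnt t) pre.length).mpr ⟨hget, ?_⟩⟩
        rw [htiles, List.take_left]
        exact hlt
    have hcontmem : PySem.Set.contains rm (pre.length : Int) = true ↔ ((pre.length : Int) ∈ rm) := by
      simp
    have hpre' : tiles = (pre ++ [t]) ++ ts := by rw [htiles]; simp
    have hlen' : (((pre ++ [t]).length : Nat) : Int) = ((pre.length : Nat) : Int) + 1 := by
      simp
    have hseen' : (fun v => (pre ++ [t]).count v)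
        = (fun v => if v = t then pre.count v + 1 else pre.count v) := by
      funext v
      rw [List.count_append]
      by_cases hv : v = t
      · subst hv; simp
      · simp [List.count_nil, Ne.symm hv, hv]
    have hic := ih (pre ++ [t]) hpre'
    rw [hlen', hseen'] at hic
    rw [PySem.List.enumerate_cons, List.filter_cons, pvRank]
    by_cases hc : pre.count t < cnt t
    · have hbt : (!(PySem.Set.contains rm (pre.length : Int))) = false := by
        rw [hcontmem.mpr (hmem.mpr hc)]
        rfl
      rw [hbt, if_pos hc]
      simp only [Bool.false_eq_true, if_false]
      exact hic
    · have hbf : (!(PySem.Set.contains rm (pre.length : Int))) = true := by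
        rcases Bool.eq_false_or_eq_true (PySem.Set.contains rm (pre.length : Int)) with h | h
        all_goals first
          | (rw [h]; rfl)
          | exact absurd (hmem.mp (hcontmem.mp h)) hc
      rw [hbf, if_neg hc]
      simp only [if_true, List.map_cons]
      rw [hic]

-- ---------- assembly ----------

lemma pvLeftovers_eq (tiles pattern : List Int)
    (hcnt : ∀ v, pattern.count v ≤ tiles.count v) :
    pvLeftovers (pvPositions tiles) tiles pattern = pvRemoveAll tiles pattern := by
  have hrm : ∀ (n : Nat), ((n : Int) ∈ (pvMarkRemoved (pvPositions tiles) pattern).2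
      ↔ ∃ v, n ∈ (pvPosL v tiles).take (pattern.count v)) := by
    intro n
    rw [pvRemoved_mem tiles pattern hcnt]
    constructor
    · rintro ⟨v, hv⟩
      rw [← List.map_take] at hv
      rcases List.mem_map.mp hv with ⟨m, hm, hmn⟩
      have : m = n := by exact_mod_cast hmn
      exact ⟨v, this ▸ hm⟩
    · rintro ⟨v, hv⟩
      exact ⟨v, by rw [← List.map_take]; exact List.mem_map.mpr ⟨n, hv, rfl⟩⟩
  have hf := pvFilter_main tiles (fun v => pattern.count v)
    (pvMarkRemoved (pvPositions tiles) pattern).2 hrm tiles [] (by simp)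
  rw [pvLeftovers]
  simp only [List.length_nil, Nat.cast_zero] at hf
  rw [hf, pvRank_eq_passC tiles _ _ (fun v => (pattern.count v : Int))
    (fun v => Or.inl (by simp)), pvRemoveAll_eq_passC pattern tiles hcnt]

-- ===== VERDICT (by name: the statement is the Claim_ definition above) =====
theorem Map_Remainings_spec : Claim_equal_Map_Remainings := by
  intro pf tiles _ hpre
  unfold Spec_Map_Remainings Map_Remainings Map_Remainings_alt
  rw [PySem.List.foldl_append_singleton_eq_map, PySem.List.foldl_append_singleton_eq_map]
  apply List.map_congr_left
  intro pattern hmem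
  have hcnt : ∀ v, pattern.count v ≤ tiles.count v := by
    intro v
    by_cases hv : v ∈ pattern
    · exact hpre pattern hmem v hv
    · simp [List.count_eq_zero_of_not_mem hv]
  rw [pvLeftovers_eq tiles pattern hcnt, pvRemoveAll_eq_passC pattern tiles hcnt]
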